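-- pv_equiv track=rewrite | github.com/Timothygwe/schedule-parser | parser/services/encoding_service.py | convert_utf8_url_to_cp1251_url
-- ===== SOURCE A (Python) =====
-- from typing import Dict
--
-- UTF8_TO_CP1251_MAP: Dict[str, str] = {
--     "%D0%B0": "%E0", "%D0%B1": "%E1",
--     "%D0%B2": "%E2", "%D0%B3": "%E3", "%D0%B4": "%E4",
--     "%D0%B5": "%E5", "%D1%91": "%B8",
--     "%D0%B6": "%E6", "%D0%B7": "%E7", "%D0%B8": "%E8",
--     "%D0%B9": "%E9", "%D0%BA": "%EA",
--     "%D0%BB": "%EB", "%D0%BC": "%EC", "%D0%BD": "%ED",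
--     "%D0%BE": "%EE", "%D0%BF": "%EF",
--     "%D1%80": "%F0", "%D1%81": "%F1", "%D1%82": "%F2",
--     "%D1%83": "%F3", "%D1%84": "%F4",
--     "%D1%85": "%F5", "%D1%86": "%F6", "%D1%87": "%F7",
--     "%D1%88": "%F8", "%D1%89": "%F9",
--     "%D1%8C": "%FC", "%D1%8B": "%FB", "%D1%8A": "%FA",
--     "%D1%8D": "%FD", "%D1%8E": "%FE",
--     "%D1%8F": "%FF", "%D0%90": "%C0", "%D0%91": "%C1",
--     "%D0%92": "%C2", "%D0%93": "%C3",
--     "%D0%94": "%C4", "%D0%95": "%C5", "%D0%81": "%A8",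
--     "%D0%96": "%C6", "%D0%97": "%C7",
--     "%D0%98": "%C8", "%D0%99": "%C9", "%D0%9A": "%CA",
--     "%D0%9B": "%CB", "%D0%9C": "%CC",
--     "%D0%9D": "%CD", "%D0%9E": "%CE", "%D0%9F": "%CF",
--     "%D0%A0": "%D0", "%D0%A1": "%D1",
--     "%D0%A2": "%D2", "%D0%A3": "%D3", "%D0%A4": "%D4",
--     "%D0%A5": "%D5", "%D0%A6": "%D6",
--     "%D0%A7": "%D7", "%D0%A8": "%D8", "%D0%A9": "%D9",
--     "%D0%AC": "%DC", "%D0%AB": "%DB",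
--     "%D0%AA": "%DA", "%D0%AD": "%DD", "%D0%AE": "%DE",
--     "%D0%AF": "%DF"
-- }
--
-- def convert_utf8_url_to_cp1251_url(encoded_str: str) -> str:
--     result = []
--     i = 0
--     length = len(encoded_str)
--
--     while i < length:
--         if i + 6 <= length:
--             chunk = encoded_str[i:i+6]
--             if chunk in UTF8_TO_CP1251_MAP:
--                 result.append(UTF8_TO_CP1251_MAP[chunk])
--                 i += 6
--                 continue
--         result.append(encoded_str[i])
--         i += 1
--
--     return "".join(result)
-- ===== SOURCE B (Python) =====
-- def convert_utf8_url_to_cp1251_url(encoded_str: str) -> str: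
--     # Arithmetic re-implementation: instead of a 66-entry lookup table, recognise the
--     # "%D<0|1>%<HH>" window and map the UTF-8 continuation byte to its CP1251 code by
--     # arithmetic (+0x30 / +0x70 and the two Yo specials), re-emitting uppercase hex.
--     def hexval(ch):
--         o = ord(ch)
--         if 48 <= o <= 57:
--             return o - 48
--         if 65 <= o <= 70:
--             return o - 55
--         return -1
--
--     def hexdigit(v):
--         return chr(48 + v) if v < 10 else chr(55 + v)
--
--     out = []
--     i = 0
--     n = len(encoded_str)
--     while i < n:
--         if encoded_str[i] == '%' and i + 6 <= n:
--             lead = encoded_str[i + 2]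
--             if encoded_str[i + 1] == 'D' and encoded_str[i + 3] == '%':
--                 hi = hexval(encoded_str[i + 4])
--                 lo = hexval(encoded_str[i + 5])
--                 if hi >= 0 and lo >= 0:
--                     b = 16 * hi + lo
--                     cp = -1
--                     if lead == '0':
--                         if 0x90 <= b <= 0xBF:
--                             cp = b + 0x30
--                         elif b == 0x81:
--                             cp = 0xA8
--                     elif lead == '1':
--                         if 0x80 <= b <= 0x8F:
--                             cp = b + 0x70
--                         elif b == 0x91:
--                             cp = 0xB8
--                     if cp >= 0:
--                         out.append('%' + hexdigit(cp // 16) + hexdigit(cp % 16))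
--                         i += 6
--                         continue
--         out.append(encoded_str[i])
--         i += 1
--     return ''.join(out)
-- ===== Notes on version B (the rewrite author's own statement) =====
-- stated objective: alternative
-- what changed: Replaces A's 66-entry UTF8-to-CP1251 lookup table with closed-form arithmetic: a percent-escape window with lead byte D0/D1 is recognised by parsing its two uppercase hex digits, the CP1251 byte is computed as b+0x30 resp. b+0x70 (plus the two Cyrillic Yo specials) and re-emitted as hex, so the dict disappears entirely.
import Mathlib
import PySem

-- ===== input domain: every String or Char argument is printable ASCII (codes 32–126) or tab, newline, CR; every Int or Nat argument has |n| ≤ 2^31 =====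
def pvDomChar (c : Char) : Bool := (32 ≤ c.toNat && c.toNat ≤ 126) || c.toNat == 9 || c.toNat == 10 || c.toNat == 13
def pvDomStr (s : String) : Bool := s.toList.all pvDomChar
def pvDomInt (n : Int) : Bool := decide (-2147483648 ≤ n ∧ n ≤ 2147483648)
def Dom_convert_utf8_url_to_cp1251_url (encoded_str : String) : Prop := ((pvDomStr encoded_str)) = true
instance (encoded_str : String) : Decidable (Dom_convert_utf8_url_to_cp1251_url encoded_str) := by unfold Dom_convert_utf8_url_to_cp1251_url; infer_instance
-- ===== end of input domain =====

-- B replaces A's 66-entry table lookup per window with closed-form arithmetic on the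
-- two hex digits of the %-escape (same O(n) cost, no table); return values proved equal.

-- ===== PORT A =====
set_option maxRecDepth 16384 in
def UTF8_TO_CP1251_MAP : PySem.Dict String String := PySem.Dict.ofList [("%D0%B0", "%E0"), ("%D0%B1", "%E1"), ("%D0%B2", "%E2"), ("%D0%B3", "%E3"), ("%D0%B4", "%E4"), ("%D0%B5", "%E5"), ("%D1%91", "%B8"), ("%D0%B6", "%E6"), ("%D0%B7", "%E7"), ("%D0%B8", "%E8"), ("%D0%B9", "%E9"), ("%D0%BA", "%EA"), ("%D0%BB", "%EB"), ("%D0%BC", "%EC"), ("%D0%BD", "%ED"), ("%D0%BE", "%EE"), ("%D0%BF", "%EF"), ("%D1%80", "%F0"), ("%D1%81", "%F1"), ("%D1%82", "%F2"), ("%D1%83", "%F3"), ("%D1%84", "%F4"), ("%D1%85", "%F5"), ("%D1%86", "%F6"), ("%D1%87", "%F7"), ("%D1%88", "%F8"), ("%D1%89", "%F9"), ("%D1%8C", "%FC"), ("%D1%8B", "%FB"), ("%D1%8A", "%FA"), ("%D1%8D", "%FD"), ("%D1%8E", "%FE"), ("%D1%8F", "%FF"), ("%D0%90", "%C0"), ("%D0%91",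 "%C1"), ("%D0%92", "%C2"), ("%D0%93", "%C3"), ("%D0%94", "%C4"), ("%D0%95", "%C5"), ("%D0%81", "%A8"), ("%D0%96", "%C6"), ("%D0%97", "%C7"), ("%D0%98", "%C8"), ("%D0%99", "%C9"), ("%D0%9A", "%CA"), ("%D0%9B", "%CB"), ("%D0%9C", "%CC"), ("%D0%9D", "%CD"), ("%D0%9E", "%CE"), ("%D0%9F", "%CF"), ("%D0%A0", "%D0"), ("%D0%A1", "%D1"), ("%D0%A2", "%D2"), ("%D0%A3", "%D3"), ("%D0%A4", "%D4"), ("%D0%A5", "%D5"), ("%D0%A6", "%D6"), ("%D0%A7", "%D7"), ("%D0%A8", "%D8"), ("%D0%A9", "%D9"), ("%D0%AC", "%DC"), ("%D0%AB", "%DB"), ("%D0%AA", "%DA"), ("%D0%AD", "%DD"), ("%D0%AE", "%DE"), ("%D0%AF", "%DF")]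

-- the while loop of A: consume the remaining characters, appending to the accumulator;
-- 'chunk in MAP' followed by 'MAP[chunk]' is the single get?
set_option maxRecDepth 16384 in
def pvGoA : List Char → List Char → List Char
  | [], acc => acc
  | c :: rest, acc =>
    if 6 ≤ (c :: rest).length then
      match PySem.Dict.get? UTF8_TO_CP1251_MAP (String.ofList ((c :: rest).take 6)) with
      | some v => pvGoA ((c :: rest).drop 6) (acc ++ v.toList)
      | none => pvGoA rest (acc ++ [c])
    else pvGoA rest (acc ++ [c])
  termination_by cs _ => cs.length
  decreasing_by all_goals (simp only [List.length_drop, List.length_cons]; omega)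

def convert_utf8_url_to_cp1251_url (encoded_str : String) : String :=
  String.ofList (pvGoA encoded_str.toList [])

-- ===== PORT B =====
-- hexval of Source B ('o' inlined)
def pvHexval (c : Char) : Int :=
  if 48 ≤ (c.toNat : Int) ∧ (c.toNat : Int) ≤ 57 then (c.toNat : Int) - 48
  else if 65 ≤ (c.toNat : Int) ∧ (c.toNat : Int) ≤ 70 then (c.toNat : Int) - 55
  else -1

-- hexdigit of Source B
def pvHexdigit (v : Int) : Char :=
  if v < 10 then Char.ofNat (48 + v).toNat else Char.ofNat (55 + v).toNat

-- the cp if-chain of Source B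
def pvCp (lead : Char) (b : Int) : Int :=
  if lead = '0' then
    (if 144 ≤ b ∧ b ≤ 191 then b + 48 else if b = 129 then 168 else -1)
  else if lead = '1' then
    (if 128 ≤ b ∧ b ≤ 143 then b + 112 else if b = 145 then 184 else -1)
  else -1

-- the while loop of B (the 6-element front pattern is Source B's 'i + 6 <= n' window)
def pvGoB : List Char → List Char → List Char
  | [], acc => acc
  | c :: c1 :: lead :: c3 :: e :: f :: rest6, acc =>
    if c = '%' then
      if c1 = 'D' ∧ c3 = '%' then
        let hi := pvHexval e
        let lo := pvHexval f
        if 0 ≤ hi ∧ 0 ≤ lo then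
          let cp := pvCp lead (16 * hi + lo)
          if 0 ≤ cp then
            pvGoB rest6 (acc ++ ['%', pvHexdigit (PySem.Int.floordiv cp 16), pvHexdigit (PySem.Int.mod cp 16)])
          else pvGoB (c1 :: lead :: c3 :: e :: f :: rest6) (acc ++ [c])
        else pvGoB (c1 :: lead :: c3 :: e :: f :: rest6) (acc ++ [c])
      else pvGoB (c1 :: lead :: c3 :: e :: f :: rest6) (acc ++ [c])
    else pvGoB (c1 :: lead :: c3 :: e :: f :: rest6) (acc ++ [c])
  | c :: rest, acc => pvGoB rest (acc ++ [c])
  termination_by cs _ => cs.length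
  decreasing_by all_goals (simp only [List.length_cons]; omega)

def convert_utf8_url_to_cp1251_url_alt (encoded_str : String) : String :=
  String.ofList (pvGoB encoded_str.toList [])

-- ===== PRECONDITION & SPEC =====
def Spec_convert_utf8_url_to_cp1251_url (encoded_str : String) (out : String) : Prop := out = convert_utf8_url_to_cp1251_url_alt encoded_str
instance (encoded_str : String) (out : String) : Decidable (Spec_convert_utf8_url_to_cp1251_url encoded_str out) := by unfold Spec_convert_utf8_url_to_cp1251_url; infer_instance

-- ===== CLAIM (what is proved, stated in full; the proofs are below) =====
def Claim_equal_convert_utf8_url_to_cp1251_url : Prop := ∀ (encoded_str : String), Dom_convert_utf8_url_to_cp1251_url encoded_str → Spec_convert_utf8_url_to_cp1251_url encoded_str (convert_utf8_url_to_cp1251_url encoded_str)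

-- ===== LEMMAS AND PROOFS =====

-- the literal form of A's dict (ofList evaluated once, for cheap kernel lookups)
set_option maxRecDepth 16384 in
def pvMAPlit : PySem.Dict String String := PySem.Dict.mk [("%D0%B0", "%E0"), ("%D0%B1", "%E1"), ("%D0%B2", "%E2"), ("%D0%B3", "%E3"), ("%D0%B4", "%E4"), ("%D0%B5", "%E5"), ("%D1%91", "%B8"), ("%D0%B6", "%E6"), ("%D0%B7", "%E7"), ("%D0%B8", "%E8"), ("%D0%B9", "%E9"), ("%D0%BA", "%EA"), ("%D0%BB", "%EB"), ("%D0%BC", "%EC"), ("%D0%BD", "%ED"), ("%D0%BE", "%EE"), ("%D0%BF", "%EF"), ("%D1%80", "%F0"), ("%D1%81", "%F1"), ("%D1%82", "%F2"), ("%D1%83", "%F3"), ("%D1%84", "%F4"), ("%D1%85", "%F5"), ("%D1%86", "%F6"), ("%D1%87", "%F7"), ("%D1%88", "%F8"), ("%D1%89", "%F9"), ("%D1%8C", "%FC"), ("%D1%8B", "%FB"), ("%D1%8A", "%FA"), ("%D1%8D", "%FD"), ("%D1%8E", "%FE"), ("%D1%8F", "%FF"), ("%D0%90", "%C0"), ("%D0%91",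 "%C1"), ("%D0%92", "%C2"), ("%D0%93", "%C3"), ("%D0%94", "%C4"), ("%D0%95", "%C5"), ("%D0%81", "%A8"), ("%D0%96", "%C6"), ("%D0%97", "%C7"), ("%D0%98", "%C8"), ("%D0%99", "%C9"), ("%D0%9A", "%CA"), ("%D0%9B", "%CB"), ("%D0%9C", "%CC"), ("%D0%9D", "%CD"), ("%D0%9E", "%CE"), ("%D0%9F", "%CF"), ("%D0%A0", "%D0"), ("%D0%A1", "%D1"), ("%D0%A2", "%D2"), ("%D0%A3", "%D3"), ("%D0%A4", "%D4"), ("%D0%A5", "%D5"), ("%D0%A6", "%D6"), ("%D0%A7", "%D7"), ("%D0%A8", "%D8"), ("%D0%A9", "%D9"), ("%D0%AC", "%DC"), ("%D0%AB", "%DB"), ("%D0%AA", "%DA"), ("%D0%AD", "%DD"), ("%D0%AE", "%DE"), ("%D0%AF", "%DF")]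

set_option maxRecDepth 65536 in
theorem pvMAP_eq : UTF8_TO_CP1251_MAP = pvMAPlit := by decide

-- the exact condition under which B's window matches
def pvCond (c c1 lead c3 e f : Char) : Prop :=
  c = '%' ∧ c1 = 'D' ∧ c3 = '%' ∧ 0 ≤ pvHexval e ∧ 0 ≤ pvHexval f ∧
    0 ≤ pvCp lead (16 * pvHexval e + pvHexval f)

-- Boolean form of pvCond on a dict entry's key
def pvCondB (p : String × String) : Bool :=
  match p.1.toList with
  | [a, b, l, d, e, f] =>
    a = '%' && b = 'D' && d = '%' && decide (0 ≤ pvHexval e) && decide (0 ≤ pvHexval f) &&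
      decide (0 ≤ pvCp l (16 * pvHexval e + pvHexval f))
  | _ => false

-- CP1251 codes as Nat, lead byte 0xD0 resp. 0xD1
def pvCpN0 (n : Nat) : Nat := if n = 129 then 168 else n + 48
def pvCpN1 (n : Nat) : Nat := if n = 145 then 184 else n + 112

theorem pvHex_inv (c : Char) (h : 0 ≤ pvHexval c) :
    pvHexval c ≤ 15 ∧ c = pvHexdigit (pvHexval c) := by
  have hofnat : Char.ofNat c.toNat = c := Char.ofNat_toNat c
  unfold pvHexval at h ⊢
  split_ifs with h1 h2
  · refine ⟨by omega, ?_⟩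
    unfold pvHexdigit
    rw [if_pos (by omega)]
    rw [show (48 + ((c.toNat : Int) - 48)).toNat = c.toNat by omega]
    exact hofnat.symm
  · refine ⟨by omega, ?_⟩
    unfold pvHexdigit
    rw [if_neg (by omega)]
    rw [show (55 + ((c.toNat : Int) - 55)).toNat = c.toNat by omega]
    exact hofnat.symm
  · omega

set_option maxRecDepth 65536 in
theorem pvTbl0 : ∀ n : Nat, n < 256 → ((144 ≤ n ∧ n ≤ 191) ∨ n = 129) →
    PySem.Dict.get? pvMAPlit
        (String.ofList ['%', 'D', '0', '%', pvHexdigit ((n / 16 : Nat) : Int), pvHexdigit ((n % 16 : Nat) : Int)]) =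
      some (String.ofList ['%', pvHexdigit ((pvCpN0 n / 16 : Nat) : Int), pvHexdigit ((pvCpN0 n % 16 : Nat) : Int)]) := by
  decide

set_option maxRecDepth 65536 in
theorem pvTbl1 : ∀ n : Nat, n < 256 → ((128 ≤ n ∧ n ≤ 143) ∨ n = 145) →
    PySem.Dict.get? pvMAPlit
        (String.ofList ['%', 'D', '1', '%', pvHexdigit ((n / 16 : Nat) : Int), pvHexdigit ((n % 16 : Nat) : Int)]) =
      some (String.ofList ['%', pvHexdigit ((pvCpN1 n / 16 : Nat) : Int), pvHexdigit ((pvCpN1 n % 16 : Nat) : Int)]) := by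
  decide

set_option maxRecDepth 65536 in
theorem pvKeysOK : (PySem.Dict.items UTF8_TO_CP1251_MAP).all pvCondB = true := by
  rw [pvMAP_eq]; decide

theorem pvWindow_pos {c c1 l c3 e f : Char} (h : pvCond c c1 l c3 e f) :
    PySem.Dict.get? UTF8_TO_CP1251_MAP (String.ofList [c, c1, l, c3, e, f]) =
      some (String.ofList ['%', pvHexdigit (PySem.Int.floordiv (pvCp l (16 * pvHexval e + pvHexval f)) 16),
                                pvHexdigit (PySem.Int.mod (pvCp l (16 * pvHexval e + pvHexval f)) 16)]) := by
  obtain ⟨hc, hc1, hc3, he, hf, hcp⟩ := h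
  subst hc; subst hc1; subst hc3
  obtain ⟨he15, heq⟩ := pvHex_inv e he
  obtain ⟨hf15, hfq⟩ := pvHex_inv f hf
  rw [pvMAP_eq]
  set b : Int := 16 * pvHexval e + pvHexval f with hb
  set n : Nat := b.toNat with hn
  have hn16 : n < 256 := by omega
  have hne : pvHexval e = ((n / 16 : Nat) : Int) := by omega
  have hnf : pvHexval f = ((n % 16 : Nat) : Int) := by omega
  rw [hne] at heq
  rw [hnf] at hfq
  by_cases hl0 : l = '0'
  · subst hl0
    have hcond : (144 ≤ b ∧ b ≤ 191) ∨ b = 129 := by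
      unfold pvCp at hcp
      rw [if_pos rfl] at hcp
      split_ifs at hcp <;> first | exact Or.inl ‹_› | exact Or.inr ‹_› | omega
    have hcpv : pvCp '0' b = ((pvCpN0 n : Nat) : Int) := by
      unfold pvCp pvCpN0
      rcases hcond with hr | h129
      · rw [if_pos rfl, if_pos hr, if_neg (show ¬ n = 129 by omega)]; push_cast; omega
      · rw [if_pos rfl, if_neg (by omega), if_pos h129, if_pos (by omega)]; norm_num
    rw [hcpv, show (16 : Int) = ((16 : Nat) : Int) by norm_num,
        PySem.Int.floordiv_natCast, PySem.Int.mod_natCast]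
    rw [heq, hfq]
    exact pvTbl0 n hn16 (by rcases hcond with hr | h129 <;> [exact Or.inl (by omega); exact Or.inr (by omega)])
  · by_cases hl1 : l = '1'
    · subst hl1
      have hcond : (128 ≤ b ∧ b ≤ 143) ∨ b = 145 := by
        unfold pvCp at hcp
        rw [if_neg (by decide), if_pos rfl] at hcp
        split_ifs at hcp <;> first | exact Or.inl ‹_› | exact Or.inr ‹_› | omega
      have hcpv : pvCp '1' b = ((pvCpN1 n : Nat) : Int) := by
        unfold pvCp pvCpN1
        rcases hcond with hr | h145
        · rw [if_neg (by decide), if_pos rfl, if_pos hr, if_neg (show ¬ n = 145 by omega)]; push_cast; omega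
        · rw [if_neg (by decide), if_pos rfl, if_neg (by omega), if_pos h145, if_pos (by omega)]; norm_num
      rw [hcpv, show (16 : Int) = ((16 : Nat) : Int) by norm_num,
          PySem.Int.floordiv_natCast, PySem.Int.mod_natCast]
      rw [heq, hfq]
      exact pvTbl1 n hn16 (by rcases hcond with hr | h145 <;> [exact Or.inl (by omega); exact Or.inr (by omega)])
    · exfalso
      unfold pvCp at hcp
      rw [if_neg hl0, if_neg hl1] at hcp
      omega

theorem pvWindow_neg {c c1 l c3 e f : Char} (h : ¬ pvCond c c1 l c3 e f) :
    PySem.Dict.get? UTF8_TO_CP1251_MAP (String.ofList [c, c1, l, c3, e, f]) = none := by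
  cases hg : PySem.Dict.get? UTF8_TO_CP1251_MAP (String.ofList [c, c1, l, c3, e, f]) with
  | none => rfl
  | some v =>
    exfalso
    have hm := PySem.Dict.mem_items_of_get?_eq_some UTF8_TO_CP1251_MAP hg
    have hall := pvKeysOK
    rw [List.all_eq_true] at hall
    have hb := hall _ hm
    unfold pvCondB at hb
    simp only [String.toList_ofList] at hb
    simp only [Bool.and_eq_true, decide_eq_true_eq] at hb
    exact h ⟨hb.1.1.1.1.1, hb.1.1.1.1.2, hb.1.1.1.2, hb.1.1.2, hb.1.2, hb.2⟩

theorem pvGoA_eq_pvGoB_bounded : ∀ (n : Nat) (cs acc : List Char), cs.length ≤ n → pvGoA cs acc = pvGoB cs acc := by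
  intro n
  induction n with
  | zero =>
    intro cs acc h
    have hnil : cs = [] := List.eq_nil_of_length_eq_zero (by omega)
    subst hnil
    simp [pvGoA, pvGoB]
  | succ n ih =>
    intro cs acc hlen
    rcases cs with _ | ⟨c, cs1⟩
    · simp [pvGoA, pvGoB]
    rcases cs1 with _ | ⟨c1, cs2⟩
    · simp [pvGoA, pvGoB]
    rcases cs2 with _ | ⟨l, cs3⟩
    · simp [pvGoA, pvGoB]
    rcases cs3 with _ | ⟨c3, cs4⟩
    · simp [pvGoA, pvGoB]
    rcases cs4 with _ | ⟨e, cs5⟩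
    · simp [pvGoA, pvGoB]
    rcases cs5 with _ | ⟨f, rest⟩
    · simp [pvGoA, pvGoB]
    have hrest : rest.length ≤ n := by simp [List.length_cons] at hlen; omega
    have hrest5 : (c1 :: l :: c3 :: e :: f :: rest).length ≤ n := by
      simp [List.length_cons] at hlen ⊢; omega
    by_cases hcnd : pvCond c c1 l c3 e f
    · have hpos := pvWindow_pos hcnd
      obtain ⟨hc, hc1, hc3, he, hf, hcp⟩ := hcnd
      subst hc; subst hc1; subst hc3
      have hA : pvGoA ('%' :: 'D' :: l :: '%' :: e :: f :: rest) acc =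
          pvGoA rest (acc ++ ['%', pvHexdigit (PySem.Int.floordiv (pvCp l (16 * pvHexval e + pvHexval f)) 16),
                                   pvHexdigit (PySem.Int.mod (pvCp l (16 * pvHexval e + pvHexval f)) 16)]) := by
        rw [pvGoA]
        rw [if_pos (by simp)]
        rw [show ('%' :: 'D' :: l :: '%' :: e :: f :: rest).take 6 = ['%', 'D', l, '%', e, f] from rfl]
        rw [hpos]
        rw [show ('%' :: 'D' :: l :: '%' :: e :: f :: rest).drop 6 = rest from rfl]
        simp
      have hB : pvGoB ('%' :: 'D' :: l :: '%' :: e :: f :: rest) acc =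
          pvGoB rest (acc ++ ['%', pvHexdigit (PySem.Int.floordiv (pvCp l (16 * pvHexval e + pvHexval f)) 16),
                                   pvHexdigit (PySem.Int.mod (pvCp l (16 * pvHexval e + pvHexval f)) 16)]) := by
        simp [pvGoB, he, hf, hcp]
      rw [hA, hB]
      exact ih rest _ hrest
    · have hneg := pvWindow_neg hcnd
      have hA : pvGoA (c :: c1 :: l :: c3 :: e :: f :: rest) acc =
          pvGoA (c1 :: l :: c3 :: e :: f :: rest) (acc ++ [c]) := by
        rw [pvGoA]
        rw [if_pos (by simp)]
        rw [show (c :: c1 :: l :: c3 :: e :: f :: rest).take 6 = [c, c1, l, c3, e, f] from rfl]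
        rw [hneg]
      have hB : pvGoB (c :: c1 :: l :: c3 :: e :: f :: rest) acc =
          pvGoB (c1 :: l :: c3 :: e :: f :: rest) (acc ++ [c]) := by
        simp only [pvGoB]
        split_ifs with h1 h2 h3 h4 <;> try rfl
        exact absurd ⟨h1, h2.1, h2.2, h3.1, h3.2, h4⟩ hcnd
      rw [hA, hB]
      exact ih _ _ hrest5

theorem pvGoA_eq_pvGoB (cs acc : List Char) : pvGoA cs acc = pvGoB cs acc :=
  pvGoA_eq_pvGoB_bounded cs.length cs acc le_rfl

-- ===== VERDICT (by name: the statement is the Claim_ definition above) =====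
theorem convert_utf8_url_to_cp1251_url_spec : Claim_equal_convert_utf8_url_to_cp1251_url := by
  intro s _
  unfold Spec_convert_utf8_url_to_cp1251_url convert_utf8_url_to_cp1251_url convert_utf8_url_to_cp1251_url_alt
  rw [pvGoA_eq_pvGoB]
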